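-- pv_equiv track=rewrite | github.com/alefeans/python-exercises | dsa/binary_search.py | plates_between_candles
-- ===== SOURCE A (Python) =====
-- import bisect
--
-- def plates_between_candles(string, queries):
--     candles_indexes = [i for i, c in enumerate(string) if c == "|"]
--     res = []
--     for a, b in queries:
--         i = bisect.bisect_left(candles_indexes, a)
--         j = bisect.bisect(candles_indexes, b) - 1
--         res.append((candles_indexes[j] - candles_indexes[i]) - (j - i) if i < j else 0)
--     return res
-- ===== SOURCE B (Python) =====
-- def plates_between_candles(string, queries):
--     n = len(string)
--     # prefix[k] = number of candles among the first k characters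
--     prefix = [0]
--     for c in string:
--         prefix.append(prefix[-1] + (1 if c == "|" else 0))
--     # nxt[k] = index of the nearest candle at position >= k, or n if none
--     nxt = [n]
--     for i in range(n - 1, -1, -1):
--         nxt.append(i if string[i] == "|" else nxt[-1])
--     nxt.reverse()
--     # prv[k] = index of the nearest candle at position < k, or -1 if none
--     prv = [-1]
--     for i in range(n):
--         prv.append(i if string[i] == "|" else prv[-1])
--     res = []
--     for a, b in queries:
--         lo = a if a > 0 else 0
--         hi = b if b < n - 1 else n - 1
--         if lo > hi:
--             res.append(0)
--             continue
--         left = nxt[lo]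
--         right = prv[hi + 1]
--         if left < right:
--             res.append((right - left) - (prefix[right + 1] - prefix[left] - 1))
--         else:
--             res.append(0)
--     return res
-- ===== Notes on version B (the rewrite author's own statement) =====
-- stated objective: alternative
-- what changed: Replaces A's per-query binary searches over the candle-index list with precomputed nearest-candle-left/right arrays and a prefix candle-count array, answering each query by O(1) array lookups; avoids the log-factor per query but is not measurably faster in CPython (A's bisect is C-coded).
import Mathlib
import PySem

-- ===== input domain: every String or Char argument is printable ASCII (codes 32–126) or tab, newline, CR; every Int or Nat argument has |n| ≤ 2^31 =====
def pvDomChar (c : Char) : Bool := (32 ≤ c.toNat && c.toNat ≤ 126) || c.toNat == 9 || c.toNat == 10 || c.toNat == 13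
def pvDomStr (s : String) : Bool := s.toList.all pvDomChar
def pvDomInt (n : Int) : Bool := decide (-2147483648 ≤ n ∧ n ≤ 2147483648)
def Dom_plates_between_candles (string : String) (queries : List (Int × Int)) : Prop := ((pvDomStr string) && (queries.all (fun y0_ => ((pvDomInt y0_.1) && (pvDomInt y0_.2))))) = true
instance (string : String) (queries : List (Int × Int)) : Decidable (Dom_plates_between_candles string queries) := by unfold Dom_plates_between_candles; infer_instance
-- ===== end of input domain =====

-- B replaces A's per-query binary searches on the candle-index list by precomputed
-- nearest-candle and prefix-count arrays with O(1) lookups per query (an alternative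
-- algorithm of similar cost); same results on every input.


-- ===== PORT A =====
-- candles_indexes = [i for i, c in enumerate(string) if c == "|"]
def pvCandles (cs : List Char) (i : Int) : List Int :=
  match cs with
  | [] => []
  | c :: t => if c = '|' then i :: pvCandles t (i + 1) else pvCandles t (i + 1)

-- bisect.bisect_left(xs, a) on the sorted candle list: the insertion point,
-- i.e. the number of elements < a (exact for sorted xs, which candles_indexes is).
def pvBisectLeft (xs : List Int) (a : Int) : Nat := xs.countP (fun e => decide (e < a))

-- bisect.bisect(xs, b): the number of elements ≤ b (exact for sorted xs).
def pvBisectRight (xs : List Int) (b : Int) : Nat := xs.countP (fun e => decide (e ≤ b))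

def plates_between_candles (string : String) (queries : List (Int × Int)) : List Int :=
  let xs := pvCandles string.toList 0
  queries.map (fun q =>
    let i := pvBisectLeft xs q.1
    let j : Int := (pvBisectRight xs q.2 : Int) - 1
    if (i : Int) < j then (xs.getD j.toNat 0 - xs.getD i 0) - (j - (i : Int)) else 0)

-- ===== PORT B =====
-- prefix = [0]; for c in string: prefix.append(prefix[-1] + (1 if c == "|" else 0))
def pvPrefList (cs : List Char) (acc : Int) : List Int :=
  match cs with
  | [] => [acc]
  | c :: t => acc :: pvPrefList t (acc + (if c = '|' then 1 else 0))

-- nxt, built right-to-left: nxt[k] = nearest candle index ≥ k, or n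
def pvNxtList (cs : List Char) (i n : Int) : List Int :=
  match cs with
  | [] => [n]
  | c :: t =>
    let rest := pvNxtList t (i + 1) n
    (if c = '|' then i else rest.headD n) :: rest

-- prv, built left-to-right: prv[k] = nearest candle index < k, or -1
def pvPrvList (cs : List Char) (i acc : Int) : List Int :=
  match cs with
  | [] => [acc]
  | c :: t => acc :: pvPrvList t (i + 1) (if c = '|' then i else acc)

def plates_between_candles_alt (string : String) (queries : List (Int × Int)) : List Int :=
  let cs := string.toList
  let n : Int := cs.length
  let pre := pvPrefList cs 0
  let nxt := pvNxtList cs 0 n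
  let prv := pvPrvList cs 0 (-1)
  queries.map (fun q =>
    let lo := if q.1 > 0 then q.1 else 0
    let hi := if q.2 < n - 1 then q.2 else n - 1
    if lo > hi then 0
    else
      let L := nxt.getD lo.toNat n
      let R := prv.getD (hi + 1).toNat (-1)
      if L < R then (R - L) - ((pre.getD (R + 1).toNat 0 - pre.getD L.toNat 0) - 1) else 0)

-- ===== PRECONDITION & SPEC =====
def Spec_plates_between_candles (string : String) (queries : List (Int × Int)) (out : List Int) : Prop := out = plates_between_candles_alt string queries
instance (string : String) (queries : List (Int × Int)) (out : List Int) : Decidable (Spec_plates_between_candles string queries out) := by unfold Spec_plates_between_candles; infer_instance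

-- ===== CLAIM (what is proved, stated in full; the proofs are below) =====
def Claim_equal_plates_between_candles : Prop := ∀ (string : String) (queries : List (Int × Int)), Dom_plates_between_candles string queries → Spec_plates_between_candles string queries (plates_between_candles string queries)

-- ===== LEMMAS AND PROOFS =====

theorem candles_mem (cs : List Char) (i : Int) :
    ∀ e ∈ pvCandles cs i, i ≤ e ∧ e < i + cs.length := by
  induction cs generalizing i with
  | nil => simp [pvCandles]
  | cons c t ih =>
    intro e he
    simp only [pvCandles] at he
    by_cases hc : c = '|'
    · simp only [if_pos hc, List.mem_cons] at he
      rcases he with rfl | he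
      · simp only [List.length_cons]; push_cast; omega
      · have := ih (i + 1) e he
        simp only [List.length_cons]; push_cast; push_cast at this; omega
    · simp only [if_neg hc] at he
      have := ih (i + 1) e he
      simp only [List.length_cons]; push_cast; push_cast at this; omega

theorem candles_sorted (cs : List Char) (i : Int) :
    (pvCandles cs i).Pairwise (· < ·) := by
  induction cs generalizing i with
  | nil => simp [pvCandles]
  | cons c t ih =>
    simp only [pvCandles]
    by_cases hc : c = '|'
    · simp only [if_pos hc, List.pairwise_cons]
      refine ⟨fun e he => ?_, ih (i + 1)⟩
      have := candles_mem t (i + 1) e he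
      omega
    · simp only [if_neg hc]; exact ih (i + 1)

theorem pref_getD (cs : List Char) (i acc : Int) (k : Nat) (d : Int) (hk : k ≤ cs.length) :
    (pvPrefList cs acc).getD k d = acc + (pvCandles cs i).countP (fun e => decide (e < i + (k : Int))) := by
  induction cs generalizing i acc k with
  | nil =>
    have hk0 : k = 0 := Nat.le_zero.mp hk
    subst hk0
    simp [pvPrefList, pvCandles]
  | cons c t ih =>
    match k with
    | 0 =>
      simp only [pvPrefList, List.getD_cons_zero, Nat.cast_zero, add_zero]
      have h0 : (pvCandles (c :: t) i).countP (fun e => decide (e < i)) = 0 := by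
        apply List.countP_eq_zero.mpr
        intro e he
        have := candles_mem (c :: t) i e he
        simp only [decide_eq_true_eq, not_lt]
        omega
      omega
    | k + 1 =>
      simp only [pvPrefList, List.getD_cons_succ]
      have hk' : k ≤ t.length := by simp only [List.length_cons] at hk; omega
      rw [ih (i + 1) _ k hk']
      have hpred : (fun e => decide (e < i + 1 + (k : Int))) = (fun e => decide (e < i + ((k + 1 : Nat) : Int))) := by
        funext e; rw [decide_eq_decide]; push_cast; omega
      rw [hpred]
      simp only [pvCandles]
      by_cases hc : c = '|'
      · rw [if_pos hc, if_pos hc, List.countP_cons_of_pos]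
        · push_cast; ring
        · simp only [decide_eq_true_eq]; push_cast; omega
      · rw [if_neg hc, if_neg hc]
        ring

theorem nxt_getD (cs : List Char) (i n : Int) (k : Nat) (d : Int) (hk : k ≤ cs.length) :
    (pvNxtList cs i n).getD k d = ((pvCandles cs i).filter (fun e => decide (i + (k : Int) ≤ e))).headD n := by
  induction cs generalizing i k d with
  | nil =>
    have hk0 : k = 0 := Nat.le_zero.mp hk
    subst hk0
    simp [pvNxtList, pvCandles]
  | cons c t ih =>
    match k with
    | 0 =>
      simp only [pvNxtList, List.getD_cons_zero, Nat.cast_zero, add_zero]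
      by_cases hc : c = '|'
      · simp only [pvCandles, if_pos hc]
        rw [List.filter_cons_of_pos (by simp)]
        simp
      · simp only [pvCandles, if_neg hc]
        have hh : (pvNxtList t (i + 1) n).headD n = (pvNxtList t (i + 1) n).getD 0 n := by
          cases t <;> simp [pvNxtList]
        rw [hh, ih (i + 1) 0 n (Nat.zero_le _)]
        congr 1
        apply List.filter_congr
        intro e he
        have := candles_mem t (i + 1) e he
        rw [decide_eq_decide]
        push_cast
        omega
    | k + 1 =>
      simp only [pvNxtList, List.getD_cons_succ]
      have hk' : k ≤ t.length := by simp only [List.length_cons] at hk; omega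
      rw [ih (i + 1) k d hk']
      simp only [pvCandles]
      by_cases hc : c = '|'
      · rw [if_pos hc, List.filter_cons_of_neg (by simp only [decide_eq_true_eq, not_le]; push_cast; omega)]
        congr 1
        apply List.filter_congr
        intro e he
        rw [decide_eq_decide]
        push_cast
        omega
      · rw [if_neg hc]
        congr 1
        apply List.filter_congr
        intro e he
        rw [decide_eq_decide]
        push_cast
        omega

theorem prv_getD (cs : List Char) (i acc : Int) (k : Nat) (d : Int) (hk : k ≤ cs.length) :
    (pvPrvList cs i acc).getD k d = ((pvCandles cs i).filter (fun e => decide (e < i + (k : Int)))).getLastD acc := by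
  induction cs generalizing i acc k with
  | nil =>
    have hk0 : k = 0 := Nat.le_zero.mp hk
    subst hk0
    simp [pvPrvList, pvCandles]
  | cons c t ih =>
    match k with
    | 0 =>
      simp only [pvPrvList, List.getD_cons_zero, Nat.cast_zero, add_zero]
      have h0 : (pvCandles (c :: t) i).filter (fun e => decide (e < i)) = [] := by
        apply List.filter_eq_nil_iff.mpr
        intro e he
        have := candles_mem (c :: t) i e he
        simp only [decide_eq_true_eq, not_lt]
        omega
      rw [h0]
      rfl
    | k + 1 =>
      simp only [pvPrvList, List.getD_cons_succ]
      have hk' : k ≤ t.length := by simp only [List.length_cons] at hk; omega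
      rw [ih (i + 1) _ k hk']
      have hpred : ((pvCandles t (i + 1)).filter (fun e => decide (e < i + 1 + (k : Int)))) =
          ((pvCandles t (i + 1)).filter (fun e => decide (e < i + ((k + 1 : Nat) : Int)))) := by
        apply List.filter_congr
        intro e he
        rw [decide_eq_decide]
        push_cast
        omega
      rw [hpred]
      simp only [pvCandles]
      by_cases hc : c = '|'
      · rw [if_pos hc, if_pos hc, List.filter_cons_of_pos (by simp only [decide_eq_true_eq]; push_cast; omega)]
        rw [List.getLastD_cons]
      · rw [if_neg hc, if_neg hc]

theorem sorted_filter_headD (xs : List Int) (a d : Int) (hs : xs.Pairwise (· < ·)) :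
    (xs.filter (fun e => decide (a ≤ e))).headD d =
      (if xs.countP (fun e => decide (e < a)) < xs.length
       then xs.getD (xs.countP (fun e => decide (e < a))) 0 else d) := by
  induction xs with
  | nil => simp
  | cons x t ih =>
    rw [List.pairwise_cons] at hs
    by_cases hax : a ≤ x
    · rw [List.filter_cons_of_pos (by simpa using hax)]
      have h0 : (x :: t).countP (fun e => decide (e < a)) = 0 := by
        apply List.countP_eq_zero.mpr
        intro e he
        simp only [List.mem_cons] at he
        simp only [decide_eq_true_eq, not_lt]
        rcases he with rfl | he
        · exact hax
        · have := hs.1 e he; omega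
      rw [h0]
      simp
    · rw [List.filter_cons_of_neg (by simpa using hax)]
      rw [List.countP_cons_of_pos (by simp only [decide_eq_true_eq]; omega)]
      rw [ih hs.2]
      simp only [List.length_cons]
      by_cases hlt : t.countP (fun e => decide (e < a)) < t.length
      · rw [if_pos hlt, if_pos (by omega)]
        rw [List.getD_cons_succ]
      · rw [if_neg hlt, if_neg (by omega)]

theorem sorted_filter_getLastD (xs : List Int) (b d : Int) (hs : xs.Pairwise (· < ·)) :
    (xs.filter (fun e => decide (e ≤ b))).getLastD d =
      (if xs.countP (fun e => decide (e ≤ b)) = 0 then d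
       else xs.getD (xs.countP (fun e => decide (e ≤ b)) - 1) 0) := by
  induction xs generalizing d with
  | nil => simp
  | cons x t ih =>
    rw [List.pairwise_cons] at hs
    by_cases hxb : x ≤ b
    · rw [List.filter_cons_of_pos (by simpa using hxb)]
      rw [List.countP_cons_of_pos (by simpa using hxb)]
      rw [List.getLastD_cons, ih x hs.2]
      by_cases h0 : t.countP (fun e => decide (e ≤ b)) = 0
      · rw [if_pos h0, if_neg (by omega), h0]
        rfl
      · rw [if_neg h0, if_neg (by omega)]
        have : t.countP (fun e => decide (e ≤ b)) + 1 - 1 = (t.countP (fun e => decide (e ≤ b)) - 1) + 1 := by omega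
        rw [this, List.getD_cons_succ]
    · have hall : ∀ e ∈ t, ¬ (e ≤ b) := by
        intro e he
        have := hs.1 e he
        omega
      rw [List.filter_cons_of_neg (by simpa using hxb)]
      rw [List.countP_cons_of_neg (by simpa using hxb)]
      have hf : t.filter (fun e => decide (e ≤ b)) = [] := by
        apply List.filter_eq_nil_iff.mpr
        intro e he
        simpa using hall e he
      have hc : t.countP (fun e => decide (e ≤ b)) = 0 := by
        apply List.countP_eq_zero.mpr
        intro e he
        simpa using hall e he
      rw [hf, hc]
      rfl

theorem sorted_countP_lt (xs : List Int) (m : Nat) (hs : xs.Pairwise (· < ·)) (hm : m < xs.length) :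
    xs.countP (fun e => decide (e < xs.getD m 0)) = m := by
  induction xs generalizing m with
  | nil => simp at hm
  | cons x t ih =>
    rw [List.pairwise_cons] at hs
    match m with
    | 0 =>
      simp only [List.getD_cons_zero]
      rw [List.countP_cons_of_neg (by simp)]
      apply List.countP_eq_zero.mpr
      intro e he
      have := hs.1 e he
      simp only [decide_eq_true_eq, not_lt]
      omega
    | m + 1 =>
      simp only [List.getD_cons_succ]
      have hm' : m < t.length := by simp only [List.length_cons] at hm; omega
      have hmem : t.getD m 0 ∈ t := by
        rw [List.getD_eq_getElem t 0 hm']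
        exact List.getElem_mem hm'
      rw [List.countP_cons_of_pos (by simp only [decide_eq_true_eq]; exact hs.1 _ hmem)]
      rw [ih m hs.2 hm']

theorem sorted_countP_le (xs : List Int) (m : Nat) (hs : xs.Pairwise (· < ·)) (hm : m < xs.length) :
    xs.countP (fun e => decide (e ≤ xs.getD m 0)) = m + 1 := by
  induction xs generalizing m with
  | nil => simp at hm
  | cons x t ih =>
    rw [List.pairwise_cons] at hs
    match m with
    | 0 =>
      simp only [List.getD_cons_zero]
      rw [List.countP_cons_of_pos (by simp)]
      have h0 : t.countP (fun e => decide (e ≤ x)) = 0 := by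
        apply List.countP_eq_zero.mpr
        intro e he
        have := hs.1 e he
        simp only [decide_eq_true_eq, not_le]
        omega
      rw [h0]
    | m + 1 =>
      simp only [List.getD_cons_succ]
      have hm' : m < t.length := by simp only [List.length_cons] at hm; omega
      have hmem : t.getD m 0 ∈ t := by
        rw [List.getD_eq_getElem t 0 hm']
        exact List.getElem_mem hm'
      rw [List.countP_cons_of_pos (by simp only [decide_eq_true_eq]; exact le_of_lt (hs.1 _ hmem))]
      rw [ih m hs.2 hm']

theorem sorted_getD_lt (xs : List Int) (p q : Nat) (hs : xs.Pairwise (· < ·))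
    (hpq : p < q) (hq : q < xs.length) : xs.getD p 0 < xs.getD q 0 := by
  rw [List.getD_eq_getElem xs 0 (lt_trans hpq hq), List.getD_eq_getElem xs 0 hq]
  exact List.pairwise_iff_getElem.mp hs p q (lt_trans hpq hq) hq hpq

theorem getD_mem (xs : List Int) (m : Nat) (hm : m < xs.length) : xs.getD m 0 ∈ xs := by
  rw [List.getD_eq_getElem xs 0 hm]
  exact List.getElem_mem hm

theorem query_eq_core (cs : List Char) (a b : Int) :
    (if ((pvBisectLeft (pvCandles cs 0) a : Int)) < (pvBisectRight (pvCandles cs 0) b : Int) - 1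
     then ((pvCandles cs 0).getD ((pvBisectRight (pvCandles cs 0) b : Int) - 1).toNat 0 -
           (pvCandles cs 0).getD (pvBisectLeft (pvCandles cs 0) a) 0) -
          (((pvBisectRight (pvCandles cs 0) b : Int) - 1) - (pvBisectLeft (pvCandles cs 0) a : Int))
     else 0) =
    (if (if a > 0 then a else 0) > (if b < (cs.length : Int) - 1 then b else (cs.length : Int) - 1) then 0
     else
       if (pvNxtList cs 0 (cs.length : Int)).getD (if a > 0 then a else 0).toNat (cs.length : Int) <
          (pvPrvList cs 0 (-1)).getD ((if b < (cs.length : Int) - 1 then b else (cs.length : Int) - 1) + 1).toNat (-1)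
       then ((pvPrvList cs 0 (-1)).getD ((if b < (cs.length : Int) - 1 then b else (cs.length : Int) - 1) + 1).toNat (-1) -
             (pvNxtList cs 0 (cs.length : Int)).getD (if a > 0 then a else 0).toNat (cs.length : Int)) -
            (((pvPrefList cs 0).getD ((pvPrvList cs 0 (-1)).getD ((if b < (cs.length : Int) - 1 then b else (cs.length : Int) - 1) + 1).toNat (-1) + 1).toNat 0 -
              (pvPrefList cs 0).getD ((pvNxtList cs 0 (cs.length : Int)).getD (if a > 0 then a else 0).toNat (cs.length : Int)).toNat 0) - 1)
       else 0) := by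
  set xs := pvCandles cs 0 with hxs
  set n : Int := (cs.length : Int) with hn
  have hs := candles_sorted cs 0
  have hmem : ∀ e ∈ xs, 0 ≤ e ∧ e < n := by
    intro e he
    have := candles_mem cs 0 e he
    omega
  set i := pvBisectLeft xs a with hidef
  set cLe := pvBisectRight xs b with hcdef
  have hiLen : i ≤ xs.length := List.countP_le_length ..
  have hcLen : cLe ≤ xs.length := List.countP_le_length ..
  set lo := if a > 0 then a else 0 with hlo
  set hi := if b < n - 1 then b else n - 1 with hhi
  have hlo0 : 0 ≤ lo ∧ a ≤ lo := by rw [hlo]; split <;> omega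
  have hhin : hi ≤ n - 1 ∧ b ≥ hi := by rw [hhi]; split <;> omega
  have hloa : ∀ e, 0 ≤ e → (lo ≤ e ↔ a ≤ e) := by
    intro e he
    rw [hlo]; split <;> omega
  have hhib : ∀ e, e ≤ n - 1 → (e ≤ hi ↔ e ≤ b) := by
    intro e he
    rw [hhi]; split <;> omega
  by_cases hcase : lo > hi
  · rw [if_pos hcase]
    have hle : cLe ≤ i := by
      rw [hidef, hcdef]
      unfold pvBisectLeft pvBisectRight
      apply List.countP_mono_left
      intro e he
      simp only [decide_eq_true_eq]
      intro heb
      have h0 := hmem e he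
      have h1 := hloa e h0.1
      have h2 := hhib e (by omega)
      omega
    rw [if_neg (by omega)]
  · rw [if_neg hcase]
    have hlohi : lo ≤ hi := by omega
    have hn1 : 1 ≤ n := by omega
    have hL1 : (pvNxtList cs 0 n).getD lo.toNat n = (xs.filter (fun e => decide (a ≤ e))).headD n := by
      rw [nxt_getD cs 0 n lo.toNat n (by omega)]
      congr 1
      apply List.filter_congr
      intro e he
      rw [decide_eq_decide]
      have h0 := hmem e he
      have h1 := hloa e h0.1
      omega
    have hR1 : (pvPrvList cs 0 (-1)).getD (hi + 1).toNat (-1) = (xs.filter (fun e => decide (e ≤ b))).getLastD (-1) := by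
      rw [prv_getD cs 0 (-1) (hi + 1).toNat (-1) (by omega)]
      congr 1
      apply List.filter_congr
      intro e he
      rw [decide_eq_decide]
      have h0 := hmem e he
      have h1 := hhib e (by omega)
      omega
    rw [hL1, hR1, sorted_filter_headD xs a n hs, sorted_filter_getLastD xs b (-1) hs]
    have hfold1 : List.countP (fun e => decide (e < a)) xs = i := rfl
    have hfold2 : List.countP (fun e => decide (e ≤ b)) xs = cLe := rfl
    rw [hfold1, hfold2]
    by_cases hij : (i : Int) < (cLe : Int) - 1
    · rw [if_pos hij]
      have hilt : i < xs.length := by omega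
      have hclt : cLe - 1 < xs.length := by omega
      have hc0 : cLe ≠ 0 := by omega
      rw [if_pos hilt, if_neg hc0]
      have hLR : xs.getD i 0 < xs.getD (cLe - 1) 0 := sorted_getD_lt xs i (cLe - 1) hs (by omega) hclt
      rw [if_pos hLR]
      obtain ⟨hL0, hLn⟩ := hmem _ (getD_mem xs i hilt)
      obtain ⟨hR0, hRn⟩ := hmem _ (getD_mem xs (cLe - 1) hclt)
      have hPR : (pvPrefList cs 0).getD (xs.getD (cLe - 1) 0 + 1).toNat 0 = (cLe : Int) := by
        rw [pref_getD cs 0 0 _ 0 (by omega)]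
        have hcg : xs.countP (fun e => decide (e < 0 + ((xs.getD (cLe - 1) 0 + 1).toNat : Int))) =
            xs.countP (fun e => decide (e ≤ xs.getD (cLe - 1) 0)) := by
          apply List.countP_congr
          intro e he
          simp only [decide_eq_true_eq]
          omega
        rw [hcg, sorted_countP_le xs (cLe - 1) hs hclt]
        push_cast
        omega
      have hPL : (pvPrefList cs 0).getD (xs.getD i 0).toNat 0 = (i : Int) := by
        rw [pref_getD cs 0 0 _ 0 (by omega)]
        have hcg : xs.countP (fun e => decide (e < 0 + ((xs.getD i 0).toNat : Int))) =
            xs.countP (fun e => decide (e < xs.getD i 0)) := by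
          apply List.countP_congr
          intro e he
          simp only [decide_eq_true_eq]
          omega
        rw [hcg, sorted_countP_lt xs i hs hilt]
        omega
      rw [hPR, hPL]
      have hj : ((cLe : Int) - 1).toNat = cLe - 1 := by omega
      rw [hj]
      omega
    · rw [if_neg hij]
      rw [if_neg ?_]
      split_ifs with h1 h2 h3
      · obtain ⟨hL0, _⟩ := hmem _ (getD_mem xs i h1)
        omega
      · obtain ⟨hL0, hLn⟩ := hmem _ (getD_mem xs i h1)
        have hclt : cLe - 1 < xs.length := by omega
        obtain ⟨hR0, hRn⟩ := hmem _ (getD_mem xs (cLe - 1) hclt)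
        rcases Nat.lt_or_ge (cLe - 1) i with hlt | hge
        · have := sorted_getD_lt xs (cLe - 1) i hs hlt h1
          omega
        · have : cLe - 1 = i := by omega
          rw [this]
          omega
      · omega
      · have hclt : cLe - 1 < xs.length := by omega
        obtain ⟨hR0, hRn⟩ := hmem _ (getD_mem xs (cLe - 1) hclt)
        omega

theorem query_eq (cs : List Char) (a b : Int) :
    (let xs := pvCandles cs 0
     let i := pvBisectLeft xs a
     let j : Int := (pvBisectRight xs b : Int) - 1
     if (i : Int) < j then (xs.getD j.toNat 0 - xs.getD i 0) - (j - (i : Int)) else 0) =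
    (let n : Int := cs.length
     let lo := if a > 0 then a else 0
     let hi := if b < n - 1 then b else n - 1
     if lo > hi then 0
     else
       let L := (pvNxtList cs 0 n).getD lo.toNat n
       let R := (pvPrvList cs 0 (-1)).getD (hi + 1).toNat (-1)
       if L < R then (R - L) - (((pvPrefList cs 0).getD (R + 1).toNat 0 - (pvPrefList cs 0).getD L.toNat 0) - 1) else 0) := by
  exact query_eq_core cs a b

-- ===== VERDICT (by name: the statement is the Claim_ definition above) =====
theorem plates_between_candles_spec : Claim_equal_plates_between_candles := by
  intro s qs _
  unfold Spec_plates_between_candles plates_between_candles plates_between_candles_alt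
  simp only [List.map_inj_left]
  intro q _
  exact query_eq s.toList q.1 q.2
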